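-- pv_equiv track=rewrite | github.com/Dacops/UniProjects | AulasPráticas/L4/Exercícios/ex4_9.py | reconhece
-- ===== SOURCE A (Python) =====
-- def reconhece(caracteres):
--     pas, n, l = 0, ('1', '2', '3', '4'), ('A', 'B', 'C', 'D')
--     for i in caracteres:
--         if i in n:
--             pas = 1
--         if i not in l and pas==0:
--             return False
--         if i not in n and pas==1:
--             return False
--     return True
-- ===== SOURCE B (Python) =====
-- def reconhece(caracteres):
--     chars = list(caracteres)
--     letters = ('A', 'B', 'C', 'D')
--     numbers = ('1', '2', '3', '4')
--     i = 0
--     while i < len(chars) and chars[i] in letters: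
--         i += 1
--     return all(c in numbers for c in chars[i:])
-- ===== Notes on version B (the rewrite author's own statement) =====
-- stated objective: simpler
-- what changed: Replaces A's one-pass state-machine with a mutable phase flag and three in-loop early returns by a two-phase check: skip the leading run of letters {A,B,C,D}, then verify every remaining character is a digit {1,2,3,4}.
import Mathlib
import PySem

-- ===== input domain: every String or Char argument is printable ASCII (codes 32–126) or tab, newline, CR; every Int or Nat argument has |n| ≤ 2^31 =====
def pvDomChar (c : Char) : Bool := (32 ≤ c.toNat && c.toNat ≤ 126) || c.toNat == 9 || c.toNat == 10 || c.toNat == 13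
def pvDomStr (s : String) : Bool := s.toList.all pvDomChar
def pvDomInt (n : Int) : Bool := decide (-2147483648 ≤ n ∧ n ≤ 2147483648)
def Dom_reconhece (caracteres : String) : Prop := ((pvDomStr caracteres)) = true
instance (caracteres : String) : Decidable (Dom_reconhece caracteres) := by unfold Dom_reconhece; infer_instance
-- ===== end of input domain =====

-- ===== PORT A =====
-- header: B is simpler — a two-phase scan (skip letters, then check digits) replacing A's flag state machine; return-value equivalence only.
def pvIsNum (c : Char) : Bool := c == '1' || c == '2' || c == '3' || c == '4'
def pvIsLet (c : Char) : Bool := c == 'A' || c == 'B' || c == 'C' || c == 'D'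

-- A's loop, step for step: 'pas' flag, updated first, then the two early-return tests
def reconheceLoop : List Char → Int → Bool
  | [], _ => true
  | c :: cs, pas =>
    let pas := if pvIsNum c then 1 else pas
    if (!pvIsLet c) && pas == 0 then false
    else if (!pvIsNum c) && pas == 1 then false
    else reconheceLoop cs pas

def reconhece (caracteres : String) : Bool := reconheceLoop caracteres.toList 0

-- ===== PORT B =====
-- B's while loop: advance past the leading run of letter characters
def skipLetters : List Char → List Char
  | [] => []
  | c :: cs => if pvIsLet c then skipLetters cs else c :: cs

def reconhece_alt (caracteres : String) : Bool :=
  (skipLetters caracteres.toList).all pvIsNum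

-- ===== PRECONDITION & SPEC =====
def Spec_reconhece (caracteres : String) (out : Bool) : Prop := out = reconhece_alt caracteres
instance (caracteres : String) (out : Bool) : Decidable (Spec_reconhece caracteres out) := by unfold Spec_reconhece; infer_instance

-- ===== CLAIM (what is proved, stated in full; the proofs are below) =====
def Claim_equal_reconhece : Prop := ∀ (caracteres : String), Dom_reconhece caracteres → Spec_reconhece caracteres (reconhece caracteres)

-- ===== LEMMAS AND PROOFS =====
theorem loop_one (cs : List Char) : reconheceLoop cs 1 = cs.all pvIsNum := by
  induction cs with
  | nil => rfl
  | cons c cs ih =>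
    by_cases h : pvIsNum c = true <;>
      simp [reconheceLoop, List.all_cons, h, ih]

theorem loop_zero (cs : List Char) :
    reconheceLoop cs 0 = (skipLetters cs).all pvIsNum := by
  induction cs with
  | nil => rfl
  | cons c cs ih =>
    by_cases hn : pvIsNum c = true
    · have hl : pvIsLet c = false := by
        revert hn; simp [pvIsNum, pvIsLet]
        rintro (((h|h)|h)|h) <;> subst h <;> decide
      simp [reconheceLoop, skipLetters, hn, hl, loop_one, List.all_cons]
    · by_cases hl : pvIsLet c = true
      · simp [reconheceLoop, skipLetters, hn, hl, ih]
      · simp [reconheceLoop, skipLetters, hn, hl, List.all_cons]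

-- ===== VERDICT (by name: the statement is the Claim_ definition above) =====
theorem reconhece_spec : Claim_equal_reconhece := by
  intro s _
  unfold Spec_reconhece reconhece reconhece_alt
  exact loop_zero s.toList
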